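-- pv_equiv track=rewrite | github.com/OlesVanHermann/manager | super_patch.py | find_best_context_match
-- ===== SOURCE A (Python) =====
-- from typing import List, Tuple, Optional, Dict
--
-- def find_contiguous_block(haystack: List[str], needle: List[str], start_from: int = 0) -> Optional[int]:
--     """Trouver l'index de needle (contigu) dans haystack à partir de start_from; ->int|None."""
--     if not needle:
--         return start_from
--     n = len(needle)
--     for start in range(start_from, len(haystack) - n + 1):
--         if haystack[start:start+n] == needle:
--             return start
--     return None
--
-- def find_best_context_match(haystack: List[str], context_before: List[str], context_after: List[str], start_from: int = 0) -> Optional[int]: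
--     """Trouver le meilleur match en cherchant TOUTES les occurrences de context_before et vérifiant que context_after suit immédiatement; (haystack,before,after,start)->int|None."""
--     if context_before and context_after:
--         search_pos = start_from
--         while True:
--             before_idx = find_contiguous_block(haystack, context_before, search_pos)
--             if before_idx is None:
--                 break
--
--             candidate_idx = before_idx + len(context_before)
--             after_end = candidate_idx + len(context_after)
--             if after_end <= len(haystack):
--                 if haystack[candidate_idx:after_end] == context_after:
--                     return candidate_idx
--
--             search_pos = before_idx + 1
--
--         if start_from > 0:
--             search_pos = 0
--             while search_pos < start_from:
--                 before_idx = find_contiguous_block(haystack, context_before, search_pos)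
--                 if before_idx is None or before_idx >= start_from:
--                     break
--
--                 candidate_idx = before_idx + len(context_before)
--                 after_end = candidate_idx + len(context_after)
--                 if after_end <= len(haystack):
--                     if haystack[candidate_idx:after_end] == context_after:
--                         return candidate_idx
--
--                 search_pos = before_idx + 1
--
--         return None
--
--     if context_before:
--         idx = find_contiguous_block(haystack, context_before, start_from)
--         if idx is not None:
--             return idx + len(context_before)
--
--     return None
-- ===== SOURCE B (Python) =====
-- def find_best_context_match(haystack, context_before, context_after, start_from=0):
--     """Collect every occurrence of context_before once, then try candidates in the
--     required order: occurrences at/after start_from first, then the wrap-around ones."""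
--     if not context_before:
--         return None
--     lb = len(context_before)
--     first = context_before[0]
--     occ = [i for i in range(len(haystack) - lb + 1)
--            if haystack[i] == first and haystack[i:i + lb] == context_before]
--     if not context_after:
--         for i in occ:
--             if i >= start_from:
--                 return i + lb
--         return None
--     la = len(context_after)
--     ordered = [i for i in occ if i >= start_from] + [i for i in occ if i < start_from]
--     for i in ordered:
--         j = i + lb
--         if haystack[j:j + la] == context_after:
--             return j
--     return None
-- ===== Notes on version B (the rewrite author's own statement) =====
-- stated objective: alternative
-- what changed: B collects all occurrences of context_before in one left-to-right pass (with a cheap first-element prefilter before slicing) and then scans the candidates once in the required order (occurrences >= start_from first, then the wrap-around ones), instead of A's two while-loops that each repeatedly restart a contiguous-block search.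
-- outside the precondition, e.g. on find_best_context_match(['x', 'a', 'c', 'd', 'y'], ['a'], ['c', 'd'], -5): A returns -3, B returns 2
import Mathlib
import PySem

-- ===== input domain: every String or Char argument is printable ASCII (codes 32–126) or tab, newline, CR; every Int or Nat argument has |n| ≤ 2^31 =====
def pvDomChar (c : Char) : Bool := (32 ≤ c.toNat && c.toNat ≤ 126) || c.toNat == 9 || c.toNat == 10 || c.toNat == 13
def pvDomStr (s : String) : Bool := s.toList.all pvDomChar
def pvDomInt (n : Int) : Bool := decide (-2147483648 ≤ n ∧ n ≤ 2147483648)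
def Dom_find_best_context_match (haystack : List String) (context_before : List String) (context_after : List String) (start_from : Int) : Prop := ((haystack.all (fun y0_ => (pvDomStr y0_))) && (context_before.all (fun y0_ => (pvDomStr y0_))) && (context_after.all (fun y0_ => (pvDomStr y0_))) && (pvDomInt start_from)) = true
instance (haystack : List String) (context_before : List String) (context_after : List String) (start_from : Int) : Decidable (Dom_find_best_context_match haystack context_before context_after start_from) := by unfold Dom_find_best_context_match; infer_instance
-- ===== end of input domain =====

-- B replaces A's two restarting while-loops by one pass that collects every occurrence of
-- context_before (with a first-element prefilter) and one scan over the candidates in the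
-- required order; objective: alternative decomposition, same asymptotic cost.

-- ===== PORT A =====
-- the for-loop of find_contiguous_block: scan the range, return the first matching start
def fcb_scan (haystack needle : List String) (n : Int) : List Int → Option Int
  | [] => none
  | start :: rest =>
    if PySem.List.slice haystack (some start) (some (start + n)) = needle then some start
    else fcb_scan haystack needle n rest

def find_contiguous_block (haystack needle : List String) (start_from : Int) : Option Int :=
  if needle = [] then some start_from
  else
    fcb_scan haystack needle (PySem.List.len needle)
      (PySem.List.pyRange start_from (PySem.List.len haystack - PySem.List.len needle + 1) 1)

-- first 'while True' loop of A; fuel bounds the iterations (enough fuel is proved below)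
def fbcm_loop1 (h cb ca : List String) : Nat → Int → Option Int
  | 0, _ => none
  | fuel+1, search_pos =>
    match find_contiguous_block h cb search_pos with
    | none => none
    | some before_idx =>
      let candidate_idx := before_idx + PySem.List.len cb
      let after_end := candidate_idx + PySem.List.len ca
      if after_end ≤ PySem.List.len h ∧
         PySem.List.slice h (some candidate_idx) (some after_end) = ca
      then some candidate_idx
      else fbcm_loop1 h cb ca fuel (before_idx + 1)

-- second 'while search_pos < start_from' loop of A
def fbcm_loop2 (h cb ca : List String) (start_from : Int) : Nat → Int → Option Int
  | 0, _ => none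
  | fuel+1, search_pos =>
    if search_pos < start_from then
      match find_contiguous_block h cb search_pos with
      | none => none
      | some before_idx =>
        if start_from ≤ before_idx then none
        else
          let candidate_idx := before_idx + PySem.List.len cb
          let after_end := candidate_idx + PySem.List.len ca
          if after_end ≤ PySem.List.len h ∧
             PySem.List.slice h (some candidate_idx) (some after_end) = ca
          then some candidate_idx
          else fbcm_loop2 h cb ca start_from fuel (before_idx + 1)
    else none

def find_best_context_match (haystack : List String) (context_before : List String) (context_after : List String) (start_from : Int) : Option Int :=
  if context_before ≠ [] ∧ context_after ≠ [] then
    match fbcm_loop1 haystack context_before context_after (haystack.length + 1) start_from with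
    | some r => some r
    | none =>
      if 0 < start_from then
        fbcm_loop2 haystack context_before context_after start_from (haystack.length + 1) 0
      else none
  else
    if context_before ≠ [] then
      match find_contiguous_block haystack context_before start_from with
      | some idx => some (idx + PySem.List.len context_before)
      | none => none
    else none

-- ===== PORT B =====
-- the occurrence comprehension of B: all i with haystack[i] == first and haystack[i:i+lb] == context_before
def fbcm_occurrences (h cb : List String) (first : String) (lb : Int) : List Int :=
  (PySem.List.pyRange 0 (PySem.List.len h - lb + 1) 1).filter
    (fun i => decide (PySem.List.pyGetD h i "" = first ∧
                      PySem.List.slice h (some i) (some (i + lb)) = cb))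

def find_best_context_match_alt (haystack : List String) (context_before : List String) (context_after : List String) (start_from : Int) : Option Int :=
  match context_before with
  | [] => none
  | first :: _ =>
    let lb := PySem.List.len context_before
    let occ := fbcm_occurrences haystack context_before first lb
    if context_after = [] then
      match occ.find? (fun i => decide (start_from ≤ i)) with
      | some i => some (i + lb)
      | none => none
    else
      let la := PySem.List.len context_after
      let ordered := occ.filter (fun i => decide (start_from ≤ i)) ++
                     occ.filter (fun i => decide (i < start_from))
      match ordered.find? (fun i =>
              decide (PySem.List.slice haystack (some (i + lb)) (some (i + lb + la)) = context_after)) with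
      | some i => some (i + lb)
      | none => none

-- ===== PRECONDITION & SPEC =====
-- Pre_ excludes negative start_from: there A's value is an accident of Python negative-slice
-- wraparound (it can match against the tail of haystack and return a NEGATIVE index, e.g. -3
-- on the cited input), while B simply treats start_from as a lower bound on positions.
def Pre_find_best_context_match (haystack : List String) (context_before : List String) (context_after : List String) (start_from : Int) : Prop := 0 ≤ start_from
instance (haystack : List String) (context_before : List String) (context_after : List String) (start_from : Int) : Decidable (Pre_find_best_context_match haystack context_before context_after start_from) := by unfold Pre_find_best_context_match; infer_instance

def pvWitness_find_best_context_match : List String × List String × List String × Int :=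
  (["x", "a", "b", "y"], ["a"], ["b"], 0)

def Spec_find_best_context_match (haystack : List String) (context_before : List String) (context_after : List String) (start_from : Int) (out : Option Int) : Prop := out = find_best_context_match_alt haystack context_before context_after start_from
instance (haystack : List String) (context_before : List String) (context_after : List String) (start_from : Int) (out : Option Int) : Decidable (Spec_find_best_context_match haystack context_before context_after start_from out) := by unfold Spec_find_best_context_match; infer_instance

-- ===== CLAIM (what is proved, stated in full; the proofs are below) =====
def Claim_equal_find_best_context_match : Prop := ∀ (haystack : List String) (context_before : List String) (context_after : List String) (start_from : Int), Dom_find_best_context_match haystack context_before context_after start_from → Pre_find_best_context_match haystack context_before context_after start_from → Spec_find_best_context_match haystack context_before context_after start_from (find_best_context_match haystack context_before context_after start_from)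

-- ===== LEMMAS AND PROOFS =====

-- the canonical occurrence list both sides are reduced to
def pvOcc (h cb : List String) : List Int :=
  (PySem.List.pyRange 0 (PySem.List.len h - PySem.List.len cb + 1) 1).filter
    (fun i => decide (PySem.List.slice h (some i) (some (i + PySem.List.len cb)) = cb))

lemma pv_find?_eq_head?_filter {α : Type} (p : α → Bool) (l : List α) :
    l.find? p = (l.filter p).head? := by
  induction l with
  | nil => rfl
  | cons a l ih =>
    cases h : p a
    · rw [List.find?_cons_of_neg (by simp [h]), List.filter_cons_of_neg (by simp [h])]
      exact ih
    · rw [List.find?_cons_of_pos (by simp [h]), List.filter_cons_of_pos (by simp [h])]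
      rfl

lemma pv_find?_cons_pos {α : Type} (p : α → Bool) (a : α) (l : List α) (h : p a = true) :
    List.find? p (a :: l) = some a := List.find?_cons_of_pos h

lemma pv_find?_cons_neg {α : Type} (p : α → Bool) (a : α) (l : List α) (h : p a = false) :
    List.find? p (a :: l) = List.find? p l := List.find?_cons_of_neg (by simp [h])

lemma pv_mem_occ {h cb : List String} {i : Int} (hi : i ∈ pvOcc h cb) :
    0 ≤ i ∧ i < PySem.List.len h - PySem.List.len cb + 1 ∧
      PySem.List.slice h (some i) (some (i + PySem.List.len cb)) = cb := by
  unfold pvOcc at hi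
  simp only [List.mem_filter, PySem.List.mem_pyRange_one, decide_eq_true_eq] at hi
  exact ⟨hi.1.1, hi.1.2, hi.2⟩

lemma pv_occ_pairwise (h cb : List String) : (pvOcc h cb).Pairwise (· < ·) := by
  unfold pvOcc
  exact (PySem.List.pairwise_lt_pyRange_one _ _).filter _

lemma pv_occ_length_le (h cb : List String) (hcb : cb ≠ []) :
    (pvOcc h cb).length ≤ h.length := by
  unfold pvOcc
  refine le_trans (List.length_filter_le _ _) ?_
  rw [PySem.List.length_pyRange_one]
  simp only [PySem.List.len_eq]
  have : cb.length ≠ 0 := by simpa using hcb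
  omega

lemma pv_range_filter (N s : Int) (hs : 0 ≤ s) :
    (PySem.List.pyRange 0 N 1).filter (fun i => decide (s ≤ i)) = PySem.List.pyRange s N 1 := by
  by_cases hN : s ≤ N
  · rw [PySem.List.pyRange_one_append 0 s N hs hN, List.filter_append]
    have h1 : (PySem.List.pyRange 0 s 1).filter (fun i => decide (s ≤ i)) = [] := by
      rw [List.filter_eq_nil_iff]
      intro a ha
      have := PySem.List.mem_pyRange_one.mp ha
      simp only [decide_eq_true_eq]
      omega
    have h2 : (PySem.List.pyRange s N 1).filter (fun i => decide (s ≤ i)) = PySem.List.pyRange s N 1 := by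
      rw [List.filter_eq_self]
      intro a ha
      have := PySem.List.mem_pyRange_one.mp ha
      simp only [decide_eq_true_eq]
      omega
    rw [h1, h2, List.nil_append]
  · rw [PySem.List.pyRange_one_eq_nil (by omega : N ≤ s), List.filter_eq_nil_iff]
    intro a ha
    have := PySem.List.mem_pyRange_one.mp ha
    simp only [decide_eq_true_eq]
    omega

lemma pv_fcb_scan_eq (h nd : List String) (n : Int) (l : List Int) :
    fcb_scan h nd n l
      = l.find? (fun i => decide (PySem.List.slice h (some i) (some (i + n)) = nd)) := by
  induction l with
  | nil => rfl
  | cons a l ih =>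
    by_cases hp : PySem.List.slice h (some a) (some (a + n)) = nd
    · simp [fcb_scan, hp]
    · simp [fcb_scan, hp, ih]

lemma pv_fcb_eq (h cb : List String) (s : Int) (hcb : cb ≠ []) (hs : 0 ≤ s) :
    find_contiguous_block h cb s
      = ((pvOcc h cb).filter (fun i => decide (s ≤ i))).head? := by
  unfold find_contiguous_block pvOcc
  rw [if_neg hcb, pv_fcb_scan_eq]
  have hcomm : ((PySem.List.pyRange 0 (PySem.List.len h - PySem.List.len cb + 1) 1).filter
        (fun i => decide (PySem.List.slice h (some i) (some (i + PySem.List.len cb)) = cb))).filter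
        (fun i => decide (s ≤ i))
      = ((PySem.List.pyRange 0 (PySem.List.len h - PySem.List.len cb + 1) 1).filter
        (fun i => decide (s ≤ i))).filter
        (fun i => decide (PySem.List.slice h (some i) (some (i + PySem.List.len cb)) = cb)) := by
    rw [List.filter_filter, List.filter_filter]
    apply List.filter_congr
    intro a _
    rw [Bool.and_comm]
  rw [hcomm, pv_range_filter _ s hs, ← pv_find?_eq_head?_filter]

lemma pv_filter_succ_head (l : List Int) (hl : l.Pairwise (· < ·)) (s b : Int)
    (hh : (l.filter (fun i => decide (s ≤ i))).head? = some b) :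
    l.filter (fun i => decide (b + 1 ≤ i)) = (l.filter (fun i => decide (s ≤ i))).tail := by
  induction l with
  | nil => simp at hh
  | cons a l ih =>
    have hpa : ∀ x ∈ l, a < x := (List.pairwise_cons.mp hl).1
    have hl' := (List.pairwise_cons.mp hl).2
    by_cases hsa : s ≤ a
    · have hba : b = a := by
        rw [List.filter_cons_of_pos (by simp [hsa])] at hh
        simp only [List.head?_cons, Option.some.injEq] at hh
        exact hh.symm
      subst hba
      have l1 : l.filter (fun i => decide (b + 1 ≤ i)) = l := by
        rw [List.filter_eq_self]
        intro x hx
        have := hpa x hx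
        simp only [decide_eq_true_eq]
        omega
      have l2 : l.filter (fun i => decide (s ≤ i)) = l := by
        rw [List.filter_eq_self]
        intro x hx
        have := hpa x hx
        simp only [decide_eq_true_eq]
        omega
      rw [List.filter_cons_of_neg (by simp only [decide_eq_true_eq]; omega),
        List.filter_cons_of_pos (by simp [hsa]), List.tail_cons, l1, l2]
    · have hh' : (l.filter (fun i => decide (s ≤ i))).head? = some b := by
        rw [List.filter_cons_of_neg (by simp [hsa])] at hh
        exact hh
      have hbmem : b ∈ l.filter (fun i => decide (s ≤ i)) := by
        cases hm : l.filter (fun i => decide (s ≤ i)) with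
        | nil => rw [hm] at hh'; simp at hh'
        | cons c t =>
          rw [hm] at hh'
          simp only [List.head?_cons, Option.some.injEq] at hh'
          subst hh'
          exact List.mem_cons_self
      have hsb : s ≤ b := by
        have := (List.mem_filter.mp hbmem).2
        simpa using this
      rw [List.filter_cons_of_neg (by simp only [decide_eq_true_eq]; omega),
        List.filter_cons_of_neg (by simp only [decide_eq_true_eq]; omega)]
      exact ih hl' hh'

lemma pv_head_of_take {α : Type} {k : Nat} {l : List α} {x : α} {r : List α}
    (h : l.take k = x :: r) : l.head? = some x := by
  cases l with
  | nil => simp at h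
  | cons a l =>
    cases k with
    | zero => simp at h
    | succ k =>
      simp only [List.take_succ_cons, List.cons.injEq] at h
      simp [h.1]

lemma pv_clamp (n : Nat) (i : Int) (h0 : 0 ≤ i) :
    PySem.List.clampIdx n i = min i.toNat n := by
  conv_lhs => rw [← Int.toNat_of_nonneg h0]
  rw [PySem.List.clampIdx_natCast]

lemma pv_slice_full (h xs : List String) (i : Int) (h0 : 0 ≤ i) (hil : i ≤ (h.length : Int))
    (hx : xs ≠ []) (hs : PySem.List.slice h (some i) (some (i + (xs.length : Int))) = xs) :
    i + (xs.length : Int) ≤ (h.length : Int) := by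
  have hlen := congrArg List.length hs
  rw [PySem.List.length_slice] at hlen
  have c1 := pv_clamp h.length i h0
  have c2 := pv_clamp h.length (i + (xs.length : Int)) (by omega)
  rw [c1, c2] at hlen
  have : xs.length ≠ 0 := by simpa using hx
  omega

lemma pv_occ_eq (h : List String) (first : String) (rest : List String) :
    fbcm_occurrences h (first :: rest) first (PySem.List.len (first :: rest))
      = pvOcc h (first :: rest) := by
  unfold fbcm_occurrences pvOcc
  apply List.filter_congr
  intro i hi
  have hmem := PySem.List.mem_pyRange_one.mp hi
  simp only [decide_eq_decide]
  constructor
  · exact And.right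
  · intro hs
    refine ⟨?_, hs⟩
    have h0 : 0 ≤ i := hmem.1
    have hsl := hs
    rw [PySem.List.len_eq] at hsl
    rw [PySem.List.slice_toNat h h0 (by omega : (0:Int) ≤ i + (((first :: rest).length : Nat) : Int))] at hsl
    have hd := pv_head_of_take hsl
    rw [List.head?_drop] at hd
    have hlt : i.toNat < h.length := (List.getElem?_eq_some_iff.mp hd).1
    rw [PySem.List.pyGetD_eq_getElem h "" h0 (by omega)]
    have := List.getElem?_eq_getElem hlt
    rw [this] at hd
    exact Option.some_inj.mp hd

lemma pv_after_cond (h cb ca : List String) (i : Int) (hcb : cb ≠ []) (hca : ca ≠ [])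
    (hi : i ∈ pvOcc h cb)
    (hsl : PySem.List.slice h (some (i + PySem.List.len cb))
             (some (i + PySem.List.len cb + PySem.List.len ca)) = ca) :
    i + PySem.List.len cb + PySem.List.len ca ≤ PySem.List.len h := by
  obtain ⟨h0, hN, hs⟩ := pv_mem_occ hi
  rw [PySem.List.len_eq] at hs
  rw [PySem.List.len_eq, PySem.List.len_eq] at hsl
  simp only [PySem.List.len_eq] at hN ⊢
  have hlb : cb.length ≠ 0 := by simpa using hcb
  have hl1 : i ≤ (h.length : Int) := by omega
  have hfull1 := pv_slice_full h cb i h0 hl1 hcb hs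
  exact pv_slice_full h ca (i + (cb.length : Int)) (by omega) hfull1 hca hsl

lemma pv_loop1_eq (h cb ca : List String) (hcb : cb ≠ []) (hca : ca ≠ []) :
    ∀ (fuel : Nat) (s : Int), 0 ≤ s →
      ((pvOcc h cb).filter (fun i => decide (s ≤ i))).length < fuel →
      fbcm_loop1 h cb ca fuel s
        = (((pvOcc h cb).filter (fun i => decide (s ≤ i))).find?
            (fun i => decide (PySem.List.slice h (some (i + PySem.List.len cb))
              (some (i + PySem.List.len cb + PySem.List.len ca)) = ca))).map
            (fun i => i + PySem.List.len cb) := by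
  intro fuel
  induction fuel with
  | zero => intro s _ hlen; exact absurd hlen (Nat.not_lt_zero _)
  | succ fuel ih =>
    intro s hs hlen
    rw [show fbcm_loop1 h cb ca (fuel + 1) s
        = match find_contiguous_block h cb s with
          | none => none
          | some before_idx =>
            if before_idx + PySem.List.len cb + PySem.List.len ca ≤ PySem.List.len h ∧
               PySem.List.slice h (some (before_idx + PySem.List.len cb))
                 (some (before_idx + PySem.List.len cb + PySem.List.len ca)) = ca
            then some (before_idx + PySem.List.len cb)
            else fbcm_loop1 h cb ca fuel (before_idx + 1) from rfl]
    rw [pv_fcb_eq h cb s hcb hs]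
    cases hm : (pvOcc h cb).filter (fun i => decide (s ≤ i)) with
    | nil => simp
    | cons b t =>
      have hbm : b ∈ (pvOcc h cb).filter (fun i => decide (s ≤ i)) := by
        rw [hm]; exact List.mem_cons_self
      have hb_occ : b ∈ pvOcc h cb := (List.mem_filter.mp hbm).1
      have hb0 : 0 ≤ b := (pv_mem_occ hb_occ).1
      have htail : (pvOcc h cb).filter (fun i => decide (b + 1 ≤ i)) = t := by
        have := pv_filter_succ_head (pvOcc h cb) (pv_occ_pairwise h cb) s b
          (by rw [hm]; rfl)
        rw [hm] at this
        simpa using this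
      simp only [List.head?_cons]
      by_cases hq : PySem.List.slice h (some (b + PySem.List.len cb))
          (some (b + PySem.List.len cb + PySem.List.len ca)) = ca
      · rw [if_pos ⟨pv_after_cond h cb ca b hcb hca hb_occ hq, hq⟩,
          pv_find?_cons_pos (fun i => decide (PySem.List.slice h (some (i + PySem.List.len cb))
            (some (i + PySem.List.len cb + PySem.List.len ca)) = ca)) b t (decide_eq_true hq)]
        rfl
      · rw [if_neg (by intro hc; exact hq hc.2)]
        rw [ih (b + 1) (by omega) (by rw [htail]; have : (b :: t).length < fuel + 1 := hm ▸ hlen; simpa using this)]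
        rw [htail, pv_find?_cons_neg (fun i => decide (PySem.List.slice h (some (i + PySem.List.len cb))
            (some (i + PySem.List.len cb + PySem.List.len ca)) = ca)) b t (decide_eq_false hq)]

lemma pv_loop2_eq (h cb ca : List String) (hcb : cb ≠ []) (hca : ca ≠ []) (sf : Int) :
    ∀ (fuel : Nat) (s : Int), 0 ≤ s →
      ((pvOcc h cb).filter (fun i => decide (s ≤ i))).length < fuel →
      fbcm_loop2 h cb ca sf fuel s
        = ((((pvOcc h cb).filter (fun i => decide (s ≤ i))).filter
              (fun i => decide (i < sf))).find?
            (fun i => decide (PySem.List.slice h (some (i + PySem.List.len cb))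
              (some (i + PySem.List.len cb + PySem.List.len ca)) = ca))).map
            (fun i => i + PySem.List.len cb) := by
  intro fuel
  induction fuel with
  | zero => intro s _ hlen; exact absurd hlen (Nat.not_lt_zero _)
  | succ fuel ih =>
    intro s hs hlen
    rw [show fbcm_loop2 h cb ca sf (fuel + 1) s
        = (if s < sf then
            match find_contiguous_block h cb s with
            | none => none
            | some before_idx =>
              if sf ≤ before_idx then none
              else
                if before_idx + PySem.List.len cb + PySem.List.len ca ≤ PySem.List.len h ∧
                   PySem.List.slice h (some (before_idx + PySem.List.len cb))
                     (some (before_idx + PySem.List.len cb + PySem.List.len ca)) = ca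
                then some (before_idx + PySem.List.len cb)
                else fbcm_loop2 h cb ca sf fuel (before_idx + 1)
          else none) from rfl]
    by_cases hguard : s < sf
    · rw [if_pos hguard, pv_fcb_eq h cb s hcb hs]
      cases hm : (pvOcc h cb).filter (fun i => decide (s ≤ i)) with
      | nil => simp
      | cons b t =>
        have hbm : b ∈ (pvOcc h cb).filter (fun i => decide (s ≤ i)) := by
          rw [hm]; exact List.mem_cons_self
        have hb_occ : b ∈ pvOcc h cb := (List.mem_filter.mp hbm).1
        have hb0 : 0 ≤ b := (pv_mem_occ hb_occ).1
        have hpw : ((pvOcc h cb).filter (fun i => decide (s ≤ i))).Pairwise (· < ·) :=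
          (pv_occ_pairwise h cb).filter _
        have htail : (pvOcc h cb).filter (fun i => decide (b + 1 ≤ i)) = t := by
          have := pv_filter_succ_head (pvOcc h cb) (pv_occ_pairwise h cb) s b
            (by rw [hm]; rfl)
          rw [hm] at this
          simpa using this
        simp only [List.head?_cons]
        by_cases hbrk : sf ≤ b
        · rw [if_pos hbrk]
          have hnil : (b :: t).filter (fun i => decide (i < sf)) = [] := by
            rw [List.filter_eq_nil_iff]
            intro x hx
            have hbx : b ≤ x := by
              rcases List.mem_cons.mp hx with hx1 | hx2
              · omega
              · have := (List.pairwise_cons.mp (hm ▸ hpw)).1 x hx2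
                omega
            simp only [decide_eq_true_eq]
            omega
          rw [hnil]
          rfl
        · rw [if_neg hbrk]
          have hflt : (b :: t).filter (fun i => decide (i < sf))
              = b :: t.filter (fun i => decide (i < sf)) := by
            simp [show b < sf by omega]
          by_cases hq : PySem.List.slice h (some (b + PySem.List.len cb))
              (some (b + PySem.List.len cb + PySem.List.len ca)) = ca
          · rw [if_pos ⟨pv_after_cond h cb ca b hcb hca hb_occ hq, hq⟩,
              hflt, pv_find?_cons_pos (fun i => decide (PySem.List.slice h (some (i + PySem.List.len cb))
            (some (i + PySem.List.len cb + PySem.List.len ca)) = ca)) b (t.filter (fun i => decide (i < sf))) (decide_eq_true hq)]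
            rfl
          · rw [if_neg (by intro hc; exact hq hc.2)]
            rw [ih (b + 1) (by omega) (by rw [htail]; have : (b :: t).length < fuel + 1 := hm ▸ hlen; simpa using this)]
            rw [htail, hflt, pv_find?_cons_neg (fun i => decide (PySem.List.slice h (some (i + PySem.List.len cb))
            (some (i + PySem.List.len cb + PySem.List.len ca)) = ca)) b (t.filter (fun i => decide (i < sf))) (decide_eq_false hq)]
    · rw [if_neg hguard]
      have hnil : (((pvOcc h cb).filter (fun i => decide (s ≤ i))).filter
          (fun i => decide (i < sf))) = [] := by
        rw [List.filter_eq_nil_iff]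
        intro x hx
        have hsx : s ≤ x := by
          have := (List.mem_filter.mp hx).2
          simpa using this
        simp only [decide_eq_true_eq]
        omega
      simp [hnil]

lemma pv_alt_eq_nilca (h : List String) (first : String) (rest : List String) (sf : Int) :
    find_best_context_match_alt h (first :: rest) [] sf
      = (((pvOcc h (first :: rest)).filter (fun i => decide (sf ≤ i))).head?).map
          (fun i => i + PySem.List.len (first :: rest)) := by
  simp only [find_best_context_match_alt]
  rw [pv_occ_eq h first rest, if_pos trivial, pv_find?_eq_head?_filter]
  cases ((pvOcc h (first :: rest)).filter (fun i => decide (sf ≤ i))).head? <;> rfl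

lemma pv_alt_eq (h ca : List String) (first : String) (rest : List String) (sf : Int)
    (hca : ca ≠ []) :
    find_best_context_match_alt h (first :: rest) ca sf
      = ((((pvOcc h (first :: rest)).filter (fun i => decide (sf ≤ i))).find?
            (fun i => decide (PySem.List.slice h (some (i + PySem.List.len (first :: rest)))
              (some (i + PySem.List.len (first :: rest) + PySem.List.len ca)) = ca))).or
          (((pvOcc h (first :: rest)).filter (fun i => decide (i < sf))).find?
            (fun i => decide (PySem.List.slice h (some (i + PySem.List.len (first :: rest)))
              (some (i + PySem.List.len (first :: rest) + PySem.List.len ca)) = ca)))).map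
        (fun i => i + PySem.List.len (first :: rest)) := by
  simp only [find_best_context_match_alt]
  rw [pv_occ_eq h first rest, if_neg hca]
  conv_rhs => rw [← List.find?_append]
  cases ((pvOcc h (first :: rest)).filter (fun i => decide (sf ≤ i)) ++
      (pvOcc h (first :: rest)).filter (fun i => decide (i < sf))).find?
        (fun i => decide (PySem.List.slice h (some (i + PySem.List.len (first :: rest)))
          (some (i + PySem.List.len (first :: rest) + PySem.List.len ca)) = ca)) <;>
    rfl

-- ===== VERDICT (by name: the statement is the Claim_ definition above) =====
theorem find_best_context_match_spec : Claim_equal_find_best_context_match := by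
  intro h cb ca sf _hdom hpre
  unfold Spec_find_best_context_match
  have hs : (0 : Int) ≤ sf := hpre
  cases cb with
  | nil => rfl
  | cons first rest =>
    have hcb : (first :: rest) ≠ [] := by simp
    by_cases hca : ca = []
    · subst hca
      rw [pv_alt_eq_nilca h first rest sf]
      unfold find_best_context_match
      rw [if_neg (by simp), if_pos hcb, pv_fcb_eq h (first :: rest) sf hcb hs]
      cases ((pvOcc h (first :: rest)).filter (fun i => decide (sf ≤ i))).head? <;> rfl
    · rw [pv_alt_eq h ca first rest sf hca]
      unfold find_best_context_match
      rw [if_pos ⟨hcb, hca⟩]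
      have hfuel1 : ((pvOcc h (first :: rest)).filter (fun i => decide (sf ≤ i))).length
          < h.length + 1 :=
        Nat.lt_succ_of_le (le_trans (List.length_filter_le _ _) (pv_occ_length_le h _ hcb))
      rw [pv_loop1_eq h (first :: rest) ca hcb hca (h.length + 1) sf hs hfuel1]
      cases hf : ((pvOcc h (first :: rest)).filter (fun i => decide (sf ≤ i))).find?
          (fun i => decide (PySem.List.slice h (some (i + PySem.List.len (first :: rest)))
            (some (i + PySem.List.len (first :: rest) + PySem.List.len ca)) = ca)) with
      | some r => simp
      | none =>
        simp only [Option.map_none, Option.none_or]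
        by_cases hsf : 0 < sf
        · rw [if_pos hsf]
          have hfuel2 : ((pvOcc h (first :: rest)).filter (fun i => decide ((0:Int) ≤ i))).length
              < h.length + 1 :=
            Nat.lt_succ_of_le (le_trans (List.length_filter_le _ _) (pv_occ_length_le h _ hcb))
          rw [pv_loop2_eq h (first :: rest) ca hcb hca sf (h.length + 1) 0 le_rfl hfuel2]
          have hall : (pvOcc h (first :: rest)).filter (fun i => decide ((0:Int) ≤ i))
              = pvOcc h (first :: rest) := by
            rw [List.filter_eq_self]
            intro x hx
            have := (pv_mem_occ hx).1
            simpa using this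
          rw [hall]
        · rw [if_neg hsf]
          have hsf0 : sf = 0 := by omega
          subst hsf0
          have hnil : (pvOcc h (first :: rest)).filter (fun i => decide (i < 0)) = [] := by
            rw [List.filter_eq_nil_iff]
            intro x hx
            have := (pv_mem_occ hx).1
            simp only [decide_eq_true_eq]
            omega
          rw [hnil]
          rfl
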